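-- pv_equiv track=rewrite | github.com/StankWizardLizard/VNL1-2022-HOPUR-28 | RU_Basement_Open/logic/match_LL.py | _get_highest_shots
-- ===== SOURCE A (Python) =====
-- def _get_highest_shots(qp_str):
--     """Takes a quality point string, returns the values of
--     the highest inshot, outshot and shot found"""
--     qp_ls = qp_str.strip().split(",")
--     highest_shot = 0
--     highest_inshot = 0
--     highest_outshot = 0
--     for turn in qp_ls:
--         # If the turn was an inshot
--         if "n" in turn:
--             turn = int(turn.replace("n", ""))
--             if turn > highest_inshot:
--                 highest_inshot = turn
--         # if the turn was an outshot
--         elif "u" in turn: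
--             turn = int(turn.replace("u", ""))
--             if turn > highest_outshot:
--                 highest_outshot = turn
--         # else the turn was a regular shot
--         elif turn.isnumeric():
--             turn = int(turn)
--             if turn > highest_shot:
--                 highest_shot = turn
--
--     # if a in- or outshot was higher than the current highest
--     # regular shot, set the regular shot to match.
--     if highest_inshot > highest_shot:
--         highest_shot = highest_inshot
--     if highest_outshot > highest_shot:
--         highest_shot = highest_outshot
--
--     return highest_shot, highest_inshot, highest_outshot
-- ===== SOURCE B (Python) =====
-- def _get_highest_shots(qp_str):
--     """Takes a quality point string, returns the values of
--     the highest inshot, outshot and shot found"""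
--     tokens = qp_str.strip().split(",")
--     highest_inshot = max([0] + [int(t.replace("n", "")) for t in tokens if "n" in t])
--     highest_outshot = max([0] + [int(t.replace("u", "")) for t in tokens if "n" not in t and "u" in t])
--     highest_regular = max([0] + [int(t) for t in tokens if "n" not in t and "u" not in t and t.isnumeric()])
--     highest_shot = max(highest_regular, highest_inshot, highest_outshot)
--     return highest_shot, highest_inshot, highest_outshot
-- ===== Notes on version B (the rewrite author's own statement) =====
-- stated objective: alternative
-- what changed: B replaces A's single stateful loop with three running maxima by three independent staged passes: each category's values are obtained declaratively by filter+map comprehensions over the token list and each maximum is a separate max call, with the overall highest taken as max of the three.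
import Mathlib
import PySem

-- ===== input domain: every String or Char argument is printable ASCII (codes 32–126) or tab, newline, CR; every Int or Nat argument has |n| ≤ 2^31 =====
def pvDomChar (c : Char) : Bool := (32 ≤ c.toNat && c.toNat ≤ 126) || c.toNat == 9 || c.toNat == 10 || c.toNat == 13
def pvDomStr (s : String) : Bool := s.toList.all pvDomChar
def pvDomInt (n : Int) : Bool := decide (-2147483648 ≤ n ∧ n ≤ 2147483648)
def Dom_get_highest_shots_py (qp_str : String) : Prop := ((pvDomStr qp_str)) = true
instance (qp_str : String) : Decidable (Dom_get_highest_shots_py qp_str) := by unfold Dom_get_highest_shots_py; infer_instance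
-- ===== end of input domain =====

-- B replaces A's single stateful loop (three running maxima plus final promotion ifs) with three
-- independent staged filter+map passes over the token list, one per category (objective: alternative decomposition, same cost).

-- ===== PORT A =====
-- A's loop body: running maxima in the triple (highest_shot, highest_inshot, highest_outshot).
-- turn.isnumeric() is ported as PySem.Chars.strIsdigit — exact on the printable-ASCII domain Dom_.
-- int(...) is PySem.Int.ofChars?; its `none` (Python ValueError) case is excluded by Pre_, `.getD 0` is never reached there.
def pvStepA (s : Int × Int × Int) (t : List Char) : Int × Int × Int :=
  if PySem.Chars.isIn ['n'] t then
    let v := (PySem.Int.ofChars? (PySem.Chars.replace t ['n'] [])).getD 0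
    if v > s.2.1 then (s.1, v, s.2.2) else s
  else if PySem.Chars.isIn ['u'] t then
    let v := (PySem.Int.ofChars? (PySem.Chars.replace t ['u'] [])).getD 0
    if v > s.2.2 then (s.1, s.2.1, v) else s
  else if PySem.Chars.strIsdigit t then
    let v := (PySem.Int.ofChars? t).getD 0
    if v > s.1 then (v, s.2.1, s.2.2) else s
  else s

def get_highest_shots_py (qp_str : String) : Int × Int × Int :=
  let qp_ls := PySem.Chars.splitOn (PySem.Chars.strip qp_str.toList) [',']
  let r := qp_ls.foldl pvStepA (0, 0, 0)
  let hs := if r.2.1 > r.1 then r.2.1 else r.1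
  let hs := if r.2.2 > hs then r.2.2 else hs
  (hs, r.2.1, r.2.2)

-- ===== PORT B =====
-- B's three list comprehensions: filter + map per category; max([0] + l) is l.foldl max 0.
def pvInVals (tokens : List (List Char)) : List Int :=
  (tokens.filter (fun t => PySem.Chars.isIn ['n'] t)).map
    (fun t => (PySem.Int.ofChars? (PySem.Chars.replace t ['n'] [])).getD 0)

def pvOutVals (tokens : List (List Char)) : List Int :=
  (tokens.filter (fun t => !PySem.Chars.isIn ['n'] t && PySem.Chars.isIn ['u'] t)).map
    (fun t => (PySem.Int.ofChars? (PySem.Chars.replace t ['u'] [])).getD 0)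

def pvRegVals (tokens : List (List Char)) : List Int :=
  (tokens.filter (fun t => !PySem.Chars.isIn ['n'] t && !PySem.Chars.isIn ['u'] t && PySem.Chars.strIsdigit t)).map
    (fun t => (PySem.Int.ofChars? t).getD 0)

def get_highest_shots_py_alt (qp_str : String) : Int × Int × Int :=
  let tokens := PySem.Chars.splitOn (PySem.Chars.strip qp_str.toList) [',']
  let highest_inshot := (pvInVals tokens).foldl max 0
  let highest_outshot := (pvOutVals tokens).foldl max 0
  let highest_regular := (pvRegVals tokens).foldl max 0
  let highest_shot := max (max highest_regular highest_inshot) highest_outshot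
  (highest_shot, highest_inshot, highest_outshot)

-- ===== PRECONDITION & SPEC =====
-- Pre_ excludes exactly the inputs on which Python A raises ValueError: a comma-separated token that
-- contains 'n' (or, failing that, 'u') but whose remainder after deleting that letter is not a valid int literal.
def Pre_get_highest_shots_py (qp_str : String) : Prop :=
  ∀ t ∈ PySem.Chars.splitOn (PySem.Chars.strip qp_str.toList) [','],
    (PySem.Chars.isIn ['n'] t = true → (PySem.Int.ofChars? (PySem.Chars.replace t ['n'] [])).isSome = true) ∧
    (PySem.Chars.isIn ['n'] t = false → PySem.Chars.isIn ['u'] t = true →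
      (PySem.Int.ofChars? (PySem.Chars.replace t ['u'] [])).isSome = true)
instance (qp_str : String) : Decidable (Pre_get_highest_shots_py qp_str) := by unfold Pre_get_highest_shots_py; infer_instance

def pvWitness_get_highest_shots_py : String := "5,13n, 4u ,x"

def Spec_get_highest_shots_py (qp_str : String) (out : Int × Int × Int) : Prop := out = get_highest_shots_py_alt qp_str
instance (qp_str : String) (out : Int × Int × Int) : Decidable (Spec_get_highest_shots_py qp_str out) := by unfold Spec_get_highest_shots_py; infer_instance

-- ===== CLAIM (what is proved, stated in full; the proofs are below) =====
def Claim_equal_get_highest_shots_py : Prop := ∀ (qp_str : String), Dom_get_highest_shots_py qp_str → Pre_get_highest_shots_py qp_str → Spec_get_highest_shots_py qp_str (get_highest_shots_py qp_str)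

-- ===== LEMMAS AND PROOFS =====

theorem pv_ite_max (b v : Int) : (if v > b then v else b) = max b v := by
  split <;> omega

-- The core invariant: A's running-maxima fold over the tokens equals the per-class maxima of B's staged lists.
theorem pv_fold_eq (l : List (List Char)) (a b c : Int) :
    l.foldl pvStepA (a, b, c) =
      ((pvRegVals l).foldl max a, (pvInVals l).foldl max b, (pvOutVals l).foldl max c) := by
  induction l generalizing a b c with
  | nil => simp [pvRegVals, pvInVals, pvOutVals]
  | cons t l ih =>
    by_cases hn : PySem.Chars.isIn ['n'] t = true
    · have hA : pvStepA (a, b, c) t =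
          (a, max b ((PySem.Int.ofChars? (PySem.Chars.replace t ['n'] [])).getD 0), c) := by
        simp only [pvStepA, hn, if_true]
        split <;> simp <;> omega
      rw [List.foldl_cons, hA, ih]
      simp [pvRegVals, pvInVals, pvOutVals, hn]
    · by_cases hu : PySem.Chars.isIn ['u'] t = true
      · have hA : pvStepA (a, b, c) t =
            (a, b, max c ((PySem.Int.ofChars? (PySem.Chars.replace t ['u'] [])).getD 0)) := by
          simp only [pvStepA, hn, hu, if_true, Bool.false_eq_true, if_false]
          split <;> simp <;> omega
        rw [List.foldl_cons, hA, ih]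
        simp [pvRegVals, pvInVals, pvOutVals, hn, hu]
      · by_cases hd : PySem.Chars.strIsdigit t = true
        · have hA : pvStepA (a, b, c) t =
              (max a ((PySem.Int.ofChars? t).getD 0), b, c) := by
            simp only [pvStepA, hn, hu, hd, if_true, Bool.false_eq_true, if_false]
            split <;> simp <;> omega
          rw [List.foldl_cons, hA, ih]
          simp [pvRegVals, pvInVals, pvOutVals, hn, hu, hd]
        · have hA : pvStepA (a, b, c) t = (a, b, c) := by
            simp [pvStepA, hn, hu, hd]
          rw [List.foldl_cons, hA, ih]
          simp [pvRegVals, pvInVals, pvOutVals, hn, hu, hd]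

-- ===== VERDICT (by name: the statement is the Claim_ definition above) =====
theorem get_highest_shots_py_spec : Claim_equal_get_highest_shots_py := by
  intro qp_str _ _
  unfold Spec_get_highest_shots_py get_highest_shots_py get_highest_shots_py_alt
  simp only [pv_fold_eq, pv_ite_max, max_comm, max_left_comm]
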